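-- pv_equiv track=rewrite | github.com/BenGHolmes/ComputationallyHardProbsDTU | sswe.py | get_all_sols
-- ===== SOURCE A (Python) =====
-- import string
--
-- GAMMA = list(string.ascii_uppercase)
--
-- def expand(t, exp):
--     exp_t = ''
--     for c in t:
--         if c in GAMMA:
--             i = GAMMA.index(c)
--             exp_t += exp[i]
--         else:
--             exp_t += c
--
--     return exp_t
--
-- def check(s, t, idx, R_arr):
--     exp = get_exp(idx, R_arr)
--     return (expand(t, exp) in s)
--
-- def get_exp(idx, R_arr):
--     exp = []
--     for i,x in enumerate(idx):
--         exp.append(R_arr[i][x])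
--
--     return exp
--
-- def inc(idx, max_arr):
--     if idx == max_arr:
--         return None
--
--     for i in reversed(range(len(idx))):
--         if idx[i] != -1:
--             idx[i] += 1
--             if i < len(max_arr) and idx[i] > max_arr[i]:
--                 idx[i] = 0
--             else:
--                 break
--
--     return idx
--
-- def get_all_sols(s, t, R_arr, prev_sols):
--     idx = [0 if c in t else -1 for c in GAMMA[:len(R_arr)]]
--     max_arr = [len(R_arr[i]) - 1 if idx[i] != -1 else -1 for i in range(len(idx))]
--     sols = []
--
--     while idx is not None:
--         if check(s, t, idx, R_arr):
--             sols.append(idx.copy())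
--         idx = inc(idx, max_arr)
--
--     return sols
-- ===== SOURCE B (Python) =====
-- import string
--
-- GAMMA = list(string.ascii_uppercase)
--
-- def get_all_sols(s, t, R_arr, prev_sols):
--     n = min(len(R_arr), len(GAMMA))
--     # one choice pool per variable position: all row indices if the variable
--     # occurs in t, otherwise the single placeholder -1
--     pools = [range(len(R_arr[i])) if GAMMA[i] in t else (-1,) for i in range(n)]
--     combos = [()]
--     for pool in pools:
--         combos = [c + (v,) for c in combos for v in pool]
--     sols = []
--     for combo in combos:
--         exp_t = ''.join(
--             R_arr[GAMMA.index(c)][combo[GAMMA.index(c)]] if c in GAMMA else c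
--             for c in t)
--         if exp_t in s:
--             sols.append(list(combo))
--     return sols
-- ===== Notes on version B (the rewrite author's own statement) =====
-- stated objective: simpler
-- what changed: Replaces the mutable odometer state (idx vector, max_arr, carry-propagating inc with a None sentinel) by building the Cartesian product of per-variable choice pools (a singleton -1 pool for variables absent from t) and filtering it, with the expansion fused into a single join instead of materializing an exp list via enumerate.
import Mathlib
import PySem

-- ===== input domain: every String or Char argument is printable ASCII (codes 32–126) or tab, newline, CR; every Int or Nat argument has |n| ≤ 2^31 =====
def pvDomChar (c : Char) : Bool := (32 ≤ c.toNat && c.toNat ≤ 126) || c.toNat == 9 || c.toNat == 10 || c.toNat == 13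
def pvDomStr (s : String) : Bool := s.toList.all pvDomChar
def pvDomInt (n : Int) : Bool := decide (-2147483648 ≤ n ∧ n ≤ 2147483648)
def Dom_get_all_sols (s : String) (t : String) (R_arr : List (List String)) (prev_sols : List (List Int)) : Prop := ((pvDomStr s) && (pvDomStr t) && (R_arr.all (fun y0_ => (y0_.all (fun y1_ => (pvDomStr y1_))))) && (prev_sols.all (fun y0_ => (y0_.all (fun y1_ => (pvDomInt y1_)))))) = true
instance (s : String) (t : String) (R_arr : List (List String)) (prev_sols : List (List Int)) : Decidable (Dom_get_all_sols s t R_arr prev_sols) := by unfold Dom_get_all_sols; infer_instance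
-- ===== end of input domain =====

-- B replaces A's mutable odometer (idx vector + carry-propagating `inc` with a None
-- sentinel) by filtering the Cartesian product of per-variable choice pools, with the
-- expansion fused into a single join; objective: simpler (not claimed faster).

-- ===== PORT A =====
def pvGAMMA : List Char :=
  ['A','B','C','D','E','F','G','H','I','J','K','L','M',
   'N','O','P','Q','R','S','T','U','V','W','X','Y','Z']

-- GAMMA.index(c) (only used when c ∈ GAMMA, where index? is some)
def pvIdxOf (c : Char) : Nat := (PySem.List.index? pvGAMMA c).getD 0

-- expand(t, exp); exp[i] raises IndexError when i ≥ len(exp) — excluded by Pre_, default "" never claimed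
def pvExpand (t : String) (exp : List String) : String :=
  t.toList.foldl (fun exp_t c =>
    if pvGAMMA.contains c then exp_t ++ PySem.List.pyGetD exp (pvIdxOf c : Int) ""
    else exp_t ++ String.singleton c) ""

-- get_exp(idx, R_arr); R_arr[i][x] raises on an empty row — excluded by Pre_, default "" never claimed
def pvGetExp (idx : List Int) (R_arr : List (List String)) : List String :=
  (PySem.List.enumerate idx).map (fun p =>
    PySem.List.pyGetD (PySem.List.pyGetD R_arr p.1 []) p.2 "")

-- check(s, t, idx, R_arr)
def pvCheck (s t : String) (idx : List Int) (R_arr : List (List String)) : Bool :=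
  PySem.Str.isIn (pvExpand t (pvGetExp idx R_arr)) s

-- the reversed carry loop of inc: returns (new idx, carry still pending);
-- carry = false is Python's `break` (entries further left untouched)
def pvIncAux : List Int → List Int → (List Int × Bool)
  | [], _ => ([], true)
  | x :: xs, [] => (x :: xs, true)   -- unreachable in A: idx and max_arr always have equal length
  | x :: xs, m :: ms =>
      let r := pvIncAux xs ms
      if r.2 then
        if x ≠ -1 then
          if x + 1 > m then (0 :: r.1, true) else ((x + 1) :: r.1, false)
        else (x :: r.1, true)
      else (x :: r.1, false)

-- inc(idx, max_arr)
def pvInc (idx max_arr : List Int) : Option (List Int) :=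
  if idx = max_arr then none else some (pvIncAux idx max_arr).1

-- the while loop; fuel only makes the recursion total (it strictly bounds the
-- number of iterations, proved below), it changes no computed value
def pvLoop (s t : String) (R_arr : List (List String)) (max_arr : List Int) :
    Nat → List Int → List (List Int) → List (List Int)
  | 0, _, sols => sols
  | fuel + 1, idx, sols =>
      let sols' := if pvCheck s t idx R_arr then sols ++ [idx] else sols
      match pvInc idx max_arr with
      | none => sols'
      | some idx' => pvLoop s t R_arr max_arr fuel idx' sols'

def get_all_sols (s : String) (t : String) (R_arr : List (List String)) (prev_sols : List (List Int)) : List (List Int) :=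
  let idx : List Int :=
    (PySem.List.slice pvGAMMA none (some (R_arr.length : Int))).map
      (fun c => if PySem.Str.isIn (String.singleton c) t then (0 : Int) else -1)
  let max_arr : List Int :=
    (PySem.List.pyRange 0 (idx.length : Int)).map
      (fun i => if PySem.List.pyGetD idx i 0 ≠ -1
                then ((PySem.List.pyGetD R_arr i []).length : Int) - 1 else -1)
  pvLoop s t R_arr max_arr (max_arr.foldl (fun a m => a * (m + 2).toNat) 1 + 1) idx []

-- ===== PORT B =====
-- one piece of the joined expansion of t under the choice vector `combo`
def pvPiece (R_arr : List (List String)) (combo : List Int) (c : Char) : String :=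
  if pvGAMMA.contains c then
    PySem.List.pyGetD (PySem.List.pyGetD R_arr (pvIdxOf c : Int) [])
      (PySem.List.pyGetD combo (pvIdxOf c : Int) 0) ""
  else String.singleton c

def get_all_sols_alt (s : String) (t : String) (R_arr : List (List String)) (prev_sols : List (List Int)) : List (List Int) :=
  let n : Nat := min R_arr.length pvGAMMA.length
  let pools : List (List Int) :=
    (PySem.List.pyRange 0 (n : Int)).map (fun i =>
      if PySem.Str.isIn (String.singleton (PySem.List.pyGetD pvGAMMA i 'A')) t
      then PySem.List.pyRange 0 ((PySem.List.pyGetD R_arr i []).length : Int)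
      else [(-1 : Int)])
  let combos : List (List Int) :=
    pools.foldl (fun cs pool => cs.flatMap (fun c => pool.map (fun v => c ++ [v]))) [[]]
  combos.foldl (fun sols combo =>
    if PySem.Str.isIn (PySem.Str.join "" (t.toList.map (pvPiece R_arr combo))) s
    then sols ++ [combo] else sols) []

-- ===== PRECONDITION & SPEC =====
-- Pre_ excludes exactly the inputs on which A raises IndexError: a candidate row
-- R_arr[i] that is empty for some i < min(len(R_arr), 26) (get_exp indexes
-- every such row on every check), or an uppercase letter of t whose GAMMA-index is ≥ len(R_arr)
-- (expand indexes exp past its end). A returns on every input admitted here.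
def Pre_get_all_sols (s : String) (t : String) (R_arr : List (List String)) (prev_sols : List (List Int)) : Prop :=
  ((R_arr.take 26).all (fun r => !r.isEmpty)) = true ∧
  (t.toList.all (fun c => !(pvGAMMA.contains c) || decide (pvIdxOf c < R_arr.length))) = true
instance (s : String) (t : String) (R_arr : List (List String)) (prev_sols : List (List Int)) : Decidable (Pre_get_all_sols s t R_arr prev_sols) := by unfold Pre_get_all_sols; infer_instance

def pvWitness_get_all_sols : String × String × List (List String) × List (List Int) :=
  ("ab", "A", [["a"], ["b"]], [])

def Spec_get_all_sols (s : String) (t : String) (R_arr : List (List String)) (prev_sols : List (List Int)) (out : List (List Int)) : Prop := out = get_all_sols_alt s t R_arr prev_sols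
instance (s : String) (t : String) (R_arr : List (List String)) (prev_sols : List (List Int)) (out : List (List Int)) : Decidable (Spec_get_all_sols s t R_arr prev_sols out) := by unfold Spec_get_all_sols; infer_instance

-- ===== CLAIM (what is proved, stated in full; the proofs are below) =====
def Claim_equal_get_all_sols : Prop := ∀ (s : String) (t : String) (R_arr : List (List String)) (prev_sols : List (List Int)), Dom_get_all_sols s t R_arr prev_sols → Pre_get_all_sols s t R_arr prev_sols → Spec_get_all_sols s t R_arr prev_sols (get_all_sols s t R_arr prev_sols)

-- ===== LEMMAS AND PROOFS =====

-- the state idx reached after all active entries were reset to their start value 0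
def pvStart (ms : List Int) : List Int := ms.map (fun m => if m = -1 then -1 else 0)

-- loop invariant: inactive entries are -1 (paired with max -1), active ones lie in [0, m]
def pvValid : List Int → List Int → Prop
  | [], [] => True
  | x :: xs, m :: ms => ((x = -1 ∧ m = -1) ∨ (0 ≤ x ∧ x ≤ m)) ∧ pvValid xs ms
  | _, _ => False

-- the states A's loop will still visit, starting at idx (inclusive), in visit order
def pvEnum : List Int → List Int → List (List Int)
  | [], [] => [[]]
  | x :: xs, m :: ms =>
      (pvEnum xs ms).map (x :: ·) ++
      (PySem.List.pyRange (x + 1) (m + 1)).flatMap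
        (fun j => (pvEnum (pvStart ms) ms).map (j :: ·))
  | _, _ => []
  termination_by _ ms => ms.length

-- rightmost-fastest Cartesian product of the pools
def pvProd : List (List Int) → List (List Int)
  | [] => [[]]
  | p :: ps => p.flatMap (fun j => (pvProd ps).map (j :: ·))

def pvPools (ms : List Int) : List (List Int) :=
  ms.map (fun m => if m = -1 then [(-1 : Int)] else PySem.List.pyRange 0 (m + 1))

theorem pvIdxOf_lt (c : Char) (h : pvGAMMA.contains c = true) : pvIdxOf c < 26 := by
  have hm : c ∈ pvGAMMA := by simpa using h
  fin_cases hm <;> decide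

theorem pvEnum_self (ms : List Int) : pvEnum ms ms = [ms] := by
  induction ms with
  | nil => simp [pvEnum]
  | cons m ms ih => simp [pvEnum, ih, PySem.List.pyRange_one_eq_nil (le_refl (m + 1))]

theorem pvValid_le (idx ms : List Int) (h : pvValid idx ms) : ∀ m ∈ ms, -1 ≤ m := by
  induction idx generalizing ms with
  | nil => cases ms with
    | nil => simp
    | cons m ms => exact absurd h (by simp [pvValid])
  | cons x xs ih =>
    cases ms with
    | nil => exact absurd h (by simp [pvValid])
    | cons m ms =>
      obtain ⟨hd, ht⟩ := h
      intro m' hm'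
      rcases List.mem_cons.mp hm' with rfl | hm'
      · rcases hd with ⟨-, rfl⟩ | ⟨h1, h2⟩ <;> omega
      · exact ih ms ht m' hm'

theorem pvValid_start (ms : List Int) (h : ∀ m ∈ ms, -1 ≤ m) : pvValid (pvStart ms) ms := by
  induction ms with
  | nil => simp [pvStart, pvValid]
  | cons m ms ih =>
    have hm := h m (by simp)
    constructor
    · by_cases hme : m = -1 <;> simp [hme] <;> omega
    · exact ih (fun m' hm' => h m' (List.mem_cons_of_mem _ hm'))

theorem pvInc_step (idx ms : List Int) (h : pvValid idx ms) :
    (idx = ms → pvIncAux idx ms = (pvStart ms, true)) ∧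
    (idx ≠ ms → (pvIncAux idx ms).2 = false ∧ pvValid (pvIncAux idx ms).1 ms ∧
      pvEnum idx ms = idx :: pvEnum (pvIncAux idx ms).1 ms) := by
  induction idx generalizing ms with
  | nil =>
    cases ms with
    | nil => exact ⟨fun _ => by simp [pvIncAux, pvStart], fun hne => absurd rfl hne⟩
    | cons m ms => exact absurd h (by simp [pvValid])
  | cons x xs ih =>
    cases ms with
    | nil => exact absurd h (by simp [pvValid])
    | cons m ms' =>
      obtain ⟨hd, ht⟩ := h
      have IH := ih ms' ht
      by_cases hxs : xs = ms'
      · subst hxs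
        have hr : pvIncAux xs xs = (pvStart xs, true) := IH.1 rfl
        constructor
        · intro heq
          have hxm : x = m := by injection heq
          subst hxm
          rcases hd with ⟨hx1, hm1⟩ | ⟨hx0, hxm⟩
          · simp [pvIncAux, hr, pvStart, hm1]
          · have hm1 : ¬ (x = -1) := by omega
            simp [pvIncAux, hr, pvStart, hm1, show x + 1 > x by omega]
        · intro hne
          have hxm : x ≠ m := fun he => hne (by rw [he])
          have hx0 : 0 ≤ x ∧ x ≤ m := by
            rcases hd with ⟨rfl, rfl⟩ | h' 
            · exact absurd rfl hxm
            · exact h'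
          have hxltm : x < m := by omega
          have hres : pvIncAux (x :: xs) (m :: xs) = ((x + 1) :: pvStart xs, false) := by
            simp [pvIncAux, hr, show ¬ (x = -1) by omega, show ¬ (x + 1 > m) by omega]
          refine ⟨by rw [hres], ?_, ?_⟩
          · rw [hres]
            exact ⟨Or.inr ⟨by omega, by omega⟩, pvValid_start xs (pvValid_le xs xs ht)⟩
          · rw [hres]
            show pvEnum (x :: xs) (m :: xs) = (x :: xs) :: pvEnum ((x + 1) :: pvStart xs) (m :: xs)
            simp only [pvEnum]
            rw [pvEnum_self, PySem.List.pyRange_one_cons (show x + 1 < m + 1 by omega)]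
            simp [List.flatMap_cons]
      · obtain ⟨hc, hv, he⟩ := IH.2 hxs
        constructor
        · intro heq
          exact absurd (by injection heq) hxs
        · intro _
          have hres : pvIncAux (x :: xs) (m :: ms') = (x :: (pvIncAux xs ms').1, false) := by
            simp [pvIncAux, hc]
          refine ⟨by rw [hres], ?_, ?_⟩
          · rw [hres]
            exact ⟨hd, hv⟩
          · rw [hres]
            show pvEnum (x :: xs) (m :: ms') = (x :: xs) :: pvEnum (x :: (pvIncAux xs ms').1) (m :: ms')
            simp only [pvEnum]
            rw [he]
            simp

theorem pvLoop_eq (s t : String) (R_arr : List (List String)) (ms : List Int) :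
    ∀ (fuel : Nat) (idx : List Int) (sols : List (List Int)), pvValid idx ms →
      (pvEnum idx ms).length ≤ fuel →
      pvLoop s t R_arr ms fuel idx sols =
        sols ++ (pvEnum idx ms).filter (fun v => pvCheck s t v R_arr) := by
  intro fuel
  induction fuel with
  | zero =>
    intro idx sols _ hlen
    have : pvEnum idx ms = [] := List.eq_nil_of_length_eq_zero (by omega)
    simp [pvLoop, this]
  | succ fuel ihf =>
    intro idx sols hval hlen
    have hstep := pvInc_step idx ms hval
    by_cases heq : idx = ms
    · subst heq
      have h2 : pvInc idx idx = none := by simp [pvInc]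
      simp only [pvLoop, h2, pvEnum_self idx, List.filter_cons]
      split <;> simp
    · obtain ⟨hc, hv, he⟩ := hstep.2 heq
      have hlen' : (pvEnum (pvIncAux idx ms).1 ms).length ≤ fuel := by
        rw [he] at hlen; simpa using hlen
      have h2 : pvInc idx ms = some (pvIncAux idx ms).1 := by simp [pvInc, heq]
      simp only [pvLoop, h2]
      rw [ihf _ _ hv hlen', he, List.filter_cons]
      split <;> simp

theorem pvEnum_length_le (ms : List Int) : ∀ idx, pvValid idx ms →
    (pvEnum idx ms).length ≤ (ms.map (fun m => (m + 2).toNat)).prod := by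
  induction ms with
  | nil =>
    intro idx hval
    cases idx with
    | nil => simp [pvEnum]
    | cons x xs => exact absurd hval (by simp [pvValid])
  | cons m ms ih =>
    intro idx hval
    cases idx with
    | nil => exact absurd hval (by simp [pvValid])
    | cons x xs =>
      obtain ⟨hd, ht⟩ := hval
      have h1 : (pvEnum xs ms).length ≤ (ms.map (fun m => (m + 2).toNat)).prod := ih xs ht
      have h2 : (pvEnum (pvStart ms) ms).length ≤ (ms.map (fun m => (m + 2).toNat)).prod :=
        ih (pvStart ms) (pvValid_start ms (pvValid_le xs ms ht))
      have hflat : ((PySem.List.pyRange (x + 1) (m + 1)).flatMap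
          (fun j => (pvEnum (pvStart ms) ms).map (j :: ·))).length
          = (m - x).toNat * (pvEnum (pvStart ms) ms).length := by
        simp only [List.length_flatMap, List.length_map]
        rw [show (List.map (fun j => (pvEnum (pvStart ms) ms).length)
              (PySem.List.pyRange (x + 1) (m + 1))) =
            List.map (Function.const Int (pvEnum (pvStart ms) ms).length)
              (PySem.List.pyRange (x + 1) (m + 1)) from rfl]
        rw [List.map_const, List.sum_replicate, PySem.List.length_pyRange_one, smul_eq_mul]
        congr 1
        omega
      have hmx : (m - x).toNat ≤ (m + 1).toNat := by
        rcases hd with ⟨rfl, rfl⟩ | ⟨h1', h2'⟩ <;> omega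
      have hm1 : -1 ≤ m := by rcases hd with ⟨-, rfl⟩ | ⟨h1', h2'⟩ <;> omega
      calc (pvEnum (x :: xs) (m :: ms)).length
          = (pvEnum xs ms).length + (m - x).toNat * (pvEnum (pvStart ms) ms).length := by
            simp only [pvEnum, List.length_append, List.length_map, hflat]
        _ ≤ (ms.map (fun m => (m + 2).toNat)).prod
              + (m + 1).toNat * (ms.map (fun m => (m + 2).toNat)).prod :=
            Nat.add_le_add h1 (Nat.mul_le_mul hmx h2)
        _ = ((m + 1).toNat + 1) * (ms.map (fun m => (m + 2).toNat)).prod := by ring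
        _ ≤ ((m :: ms).map (fun m => (m + 2).toNat)).prod := by
            rw [List.map_cons, List.prod_cons]
            exact Nat.mul_le_mul_right _ (by omega)

theorem pvFoldl_mul (f : Int → Nat) (l : List Int) : ∀ a : Nat,
    l.foldl (fun a m => a * f m) a = a * (l.map f).prod := by
  induction l with
  | nil => simp
  | cons m l ih => intro a; simp [ih, List.prod_cons, mul_assoc]

theorem pvEnum_start_eq (ms : List Int) (h : ∀ m ∈ ms, -1 ≤ m) :
    pvEnum (pvStart ms) ms = pvProd (pvPools ms) := by
  induction ms with
  | nil => simp [pvStart, pvEnum, pvPools, pvProd]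
  | cons m ms ih =>
    have ih' := ih (fun m' hm' => h m' (List.mem_cons_of_mem _ hm'))
    have hm := h m (by simp)
    by_cases hme : m = -1
    · subst hme
      rw [show pvStart ((-1 : Int) :: ms) = -1 :: pvStart ms from by simp [pvStart],
        show pvPools ((-1 : Int) :: ms) = [(-1 : Int)] :: pvPools ms from by simp [pvPools]]
      simp only [pvEnum, pvProd]
      rw [PySem.List.pyRange_one_eq_nil (by omega)]
      simp [ih']
    · rw [show pvStart (m :: ms) = 0 :: pvStart ms from by simp [pvStart, hme],
        show pvPools (m :: ms) = PySem.List.pyRange 0 (m + 1) :: pvPools ms from by simp [pvPools, hme]]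
      simp only [pvEnum, pvProd]
      rw [PySem.List.pyRange_one_cons (show (0 : Int) < m + 1 by omega)]
      simp [ih']

theorem pvProd_foldl (ps : List (List Int)) : ∀ acc : List (List Int),
    ps.foldl (fun cs pool => cs.flatMap (fun c => pool.map (fun v => c ++ [v]))) acc =
      acc.flatMap (fun c => (pvProd ps).map (c ++ ·)) := by
  induction ps with
  | nil => intro acc; simp [pvProd]
  | cons p ps ih =>
    intro acc
    simp only [List.foldl_cons, ih, pvProd]
    simp [List.flatMap_assoc, List.flatMap_map, List.map_flatMap, List.map_map, Function.comp_def, List.append_assoc]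

theorem mem_pvProd_length (ps : List (List Int)) : ∀ v ∈ pvProd ps, v.length = ps.length := by
  induction ps with
  | nil => simp [pvProd]
  | cons p ps ih =>
    intro v hv
    simp only [pvProd, List.mem_flatMap, List.mem_map] at hv
    obtain ⟨j, -, w, hw, rfl⟩ := hv
    simp [ih w hw]

theorem pvJoin_nil_flatten (l : List (List Char)) : PySem.Chars.join [] l = l.flatten := by
  induction l with
  | nil => simp [PySem.Chars.join_nil]
  | cons p rest ih =>
    cases rest with
    | nil => simp [PySem.Chars.join_singleton]
    | cons q r => rw [PySem.Chars.join_cons_cons]; simp_all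

theorem pvFoldl_toList (l : List Char) (f : Char → String) : ∀ acc : String,
    (l.foldl (fun a c => a ++ f c) acc).toList
      = acc.toList ++ (l.map (fun c => (f c).toList)).flatten := by
  induction l with
  | nil => intro acc; simp
  | cons c l ih => intro acc; simp [ih, String.toList_append]

theorem pvCheck_eq (s t : String) (R_arr : List (List String)) (combo : List Int)
    (hlen : combo.length = min R_arr.length 26)
    (hpre : ∀ c ∈ t.toList, pvGAMMA.contains c = true → pvIdxOf c < R_arr.length) :
    pvCheck s t combo R_arr =
      PySem.Str.isIn (PySem.Str.join "" (t.toList.map (pvPiece R_arr combo))) s := by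
  have hexp : pvGetExp combo R_arr = (PySem.List.pyRange 0 (combo.length : Int)).map
      (fun j => PySem.List.pyGetD (PySem.List.pyGetD R_arr j []) (PySem.List.pyGetD combo j 0) "") := by
    unfold pvGetExp
    rw [PySem.List.enumerate_eq_map_pyRange combo 0, PySem.List.len_eq, List.map_map]
    rfl
  have hpieces : ∀ c ∈ t.toList,
      (if pvGAMMA.contains c then PySem.List.pyGetD (pvGetExp combo R_arr) (pvIdxOf c : Int) ""
       else String.singleton c) = pvPiece R_arr combo c := by
    intro c hc
    by_cases hcont : pvGAMMA.contains c
    · have h26 := pvIdxOf_lt c hcont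
      have hR := hpre c hc hcont
      have hi : pvIdxOf c < combo.length := by omega
      simp only [pvPiece, if_pos hcont, hexp]
      exact PySem.List.pyGetD_map_pyRange _ combo.length (pvIdxOf c) "" hi
    · simp only [pvPiece, if_neg hcont]
  unfold pvCheck
  rw [PySem.Str.isIn_eq, PySem.Str.isIn_eq]
  congr 1
  unfold pvExpand
  rw [show (fun (exp_t : String) c => if pvGAMMA.contains c
          then exp_t ++ PySem.List.pyGetD (pvGetExp combo R_arr) (pvIdxOf c : Int) ""
          else exp_t ++ String.singleton c)
      = fun (a : String) c => a ++ (if pvGAMMA.contains c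
          then PySem.List.pyGetD (pvGetExp combo R_arr) (pvIdxOf c : Int) ""
          else String.singleton c) from by funext a c; split <;> rfl]
  rw [pvFoldl_toList, PySem.Str.toList_join]
  have h0 : ("" : String).toList = [] := by simp
  rw [h0, pvJoin_nil_flatten]
  simp only [List.map_map, List.nil_append]
  congr 1
  apply List.map_congr_left
  intro c hc
  simp only [Function.comp_apply, ← hpieces c hc]

-- ===== VERDICT (by name: the statement is the Claim_ definition above) =====
theorem get_all_sols_spec : Claim_equal_get_all_sols := by
  intro s t R_arr prev_sols hdom hpre
  unfold Spec_get_all_sols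
  simp only [get_all_sols, get_all_sols_alt]
  set idxl := (List.map (fun c => if PySem.Str.isIn (String.singleton c) t = true then (0:Int) else -1)
      (PySem.List.slice pvGAMMA none (some (R_arr.length : Int)))) with hidxl
  set maxl := (List.map
      (fun i => if PySem.List.pyGetD idxl i 0 ≠ -1
        then ((PySem.List.pyGetD R_arr i []).length : Int) - 1 else -1)
      (PySem.List.pyRange 0 (idxl.length : Int))) with hmaxl
  set poolsB := (List.map
      (fun i => if PySem.Str.isIn (String.singleton (PySem.List.pyGetD pvGAMMA i 'A')) t = true
        then PySem.List.pyRange 0 ((PySem.List.pyGetD R_arr i []).length : Int)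
        else [(-1 : Int)])
      (PySem.List.pyRange 0 ((min R_arr.length pvGAMMA.length : Nat) : Int))) with hpoolsB
  have h26 : pvGAMMA.length = 26 := rfl
  have hpre1 : ∀ (k : Nat) (hk : k < R_arr.length), k < 26 → R_arr[k] ≠ [] := by
    intro k hk hk26
    have hmem : R_arr[k] ∈ R_arr.take 26 := by
      have hk' : k < (R_arr.take 26).length := by simp [List.length_take]; omega
      have : (R_arr.take 26)[k] = R_arr[k] := List.getElem_take
      rw [← this]
      exact List.getElem_mem hk'
    have := List.all_eq_true.mp hpre.1 _ hmem
    simpa using this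
  have hpre2 : ∀ c ∈ t.toList, pvGAMMA.contains c = true → pvIdxOf c < R_arr.length := by
    intro c hc hcont
    have := List.all_eq_true.mp hpre.2 c hc
    rw [hcont] at this
    simpa using this
  have hslice : PySem.List.slice pvGAMMA none (some (R_arr.length : Int)) = pvGAMMA.take R_arr.length := by
    rw [PySem.List.slice_to pvGAMMA (by exact_mod_cast Nat.zero_le _)]
    simp
  have hlenidx : idxl.length = min R_arr.length 26 := by
    rw [hidxl, hslice]
    simp [List.length_take, h26]
  have hidx2 : idxl = (PySem.List.pyRange 0 ((min R_arr.length 26 : Nat) : Int)).map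
      (fun i => if PySem.Str.isIn (String.singleton (PySem.List.pyGetD pvGAMMA i 'A')) t = true
        then (0 : Int) else -1) := by
    rw [hidxl, hslice]
    apply List.ext_getElem
    · simp [PySem.List.length_pyRange_one, List.length_take, h26]
      omega
    · intro k h1 h2
      have hk26 : k < 26 := by
        simp [List.length_take, h26] at h1
        omega
      simp only [List.getElem_map, List.getElem_take, PySem.List.getElem_pyRange_one]
      rw [show (0 : Int) + (k : Int) = (k : Int) by ring,
        PySem.List.pyGetD_ofNat pvGAMMA k 'A' (by omega)]
  have hrow : ∀ i : Int, 0 ≤ i → i < ((min R_arr.length 26 : Nat) : Int) →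
      PySem.List.pyGetD R_arr i [] ≠ [] := by
    intro i h0 hi
    obtain ⟨k, rfl⟩ := Int.eq_ofNat_of_zero_le h0
    have hk : k < min R_arr.length 26 := by exact_mod_cast hi
    rw [PySem.List.pyGetD_ofNat R_arr k [] (by omega)]
    exact hpre1 k (by omega) (by omega)
  have hmax2 : maxl = (PySem.List.pyRange 0 ((min R_arr.length 26 : Nat) : Int)).map
      (fun i => if PySem.Str.isIn (String.singleton (PySem.List.pyGetD pvGAMMA i 'A')) t = true
        then ((PySem.List.pyGetD R_arr i []).length : Int) - 1 else -1) := by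
    rw [hmaxl, hlenidx]
    apply List.map_congr_left
    intro i hi
    obtain ⟨h0, hlt⟩ := PySem.List.mem_pyRange_one.mp hi
    rw [hidx2, PySem.List.pyGetD_map_pyRange_of_nonneg _ _ _ _ h0 hlt]
    by_cases hA : PySem.Chars.isIn [PySem.List.pyGetD pvGAMMA i 'A'] t.toList = true <;>
      simp [hA, PySem.Str.isIn_eq]
  have hm1 : ∀ m ∈ maxl, -1 ≤ m := by
    rw [hmax2]
    intro m hm
    obtain ⟨i, -, rfl⟩ := List.mem_map.mp hm
    split
    · have := Int.natCast_nonneg (PySem.List.pyGetD R_arr i []).length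
      omega
    · omega
  have hstart : pvStart maxl = idxl := by
    rw [hmax2, hidx2]
    unfold pvStart
    rw [List.map_map]
    apply List.map_congr_left
    intro i hi
    obtain ⟨h0, hlt⟩ := PySem.List.mem_pyRange_one.mp hi
    simp only [Function.comp_apply]
    by_cases hA : PySem.Chars.isIn [PySem.List.pyGetD pvGAMMA i 'A'] t.toList = true
    · have hne := hrow i h0 hlt
      have hlen1 : 1 ≤ (PySem.List.pyGetD R_arr i []).length :=
        Nat.pos_of_ne_zero (fun h0' => hne (List.eq_nil_of_length_eq_zero h0'))
      have : ¬ (((PySem.List.pyGetD R_arr i []).length : Int) - 1 = -1) := by omega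
      simp [hA, this, PySem.Str.isIn_eq]
    · simp [hA, PySem.Str.isIn_eq]
  have hpools : pvPools maxl = poolsB := by
    rw [hmax2, hpoolsB, h26]
    unfold pvPools
    rw [List.map_map]
    apply List.map_congr_left
    intro i hi
    obtain ⟨h0, hlt⟩ := PySem.List.mem_pyRange_one.mp hi
    simp only [Function.comp_apply]
    by_cases hA : PySem.Chars.isIn [PySem.List.pyGetD pvGAMMA i 'A'] t.toList = true
    · have hne := hrow i h0 hlt
      have hlen1 : 1 ≤ (PySem.List.pyGetD R_arr i []).length :=
        Nat.pos_of_ne_zero (fun h0' => hne (List.eq_nil_of_length_eq_zero h0'))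
      have h1 : ¬ (((PySem.List.pyGetD R_arr i []).length : Int) - 1 = -1) := by omega
      have h2 : ((PySem.List.pyGetD R_arr i []).length : Int) - 1 + 1
          = ((PySem.List.pyGetD R_arr i []).length : Int) := by ring
      simp [hA, h1, h2, PySem.Str.isIn_eq]
    · simp [hA, PySem.Str.isIn_eq]
  have hvalid : pvValid idxl maxl := by
    rw [← hstart]
    exact pvValid_start maxl hm1
  have hfuel : (pvEnum idxl maxl).length ≤ maxl.foldl (fun a m => a * (m + 2).toNat) 1 + 1 := by
    rw [pvFoldl_mul, one_mul]
    have := pvEnum_length_le maxl idxl hvalid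
    omega
  rw [pvLoop_eq s t R_arr maxl _ idxl [] hvalid hfuel, List.nil_append]
  rw [← hstart, pvEnum_start_eq maxl hm1, hpools]
  rw [pvProd_foldl poolsB [[]]]
  have hcombos : ([([] : List Int)].flatMap (fun c => (pvProd poolsB).map (c ++ ·))) = pvProd poolsB := by
    simp
  rw [hcombos]
  rw [PySem.List.foldl_append_if_eq_filter
    (fun combo => PySem.Str.isIn (PySem.Str.join "" (List.map (pvPiece R_arr combo) t.toList)) s)
    (pvProd poolsB) [], List.nil_append]
  apply List.filter_congr
  intro combo hmem
  have hlen : combo.length = min R_arr.length 26 := by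
    rw [mem_pvProd_length poolsB combo hmem, hpoolsB]
    simp [PySem.List.length_pyRange_one, h26]
    omega
  exact pvCheck_eq s t R_arr combo hlen hpre2
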